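-- pv_equiv track=rewrite | github.com/unioslo/zabbix-cli | zabbix_cli/utils/utils.py | get_maintenance_active_months
-- ===== SOURCE A (Python) =====
-- from typing import List
--
-- def get_maintenance_active_months(schedule: int | None) -> List[str]:
--     if schedule is None:
--         return []
--     months = {
--         0b000000000001: "January",
--         0b000000000010: "February",
--         0b000000000100: "March",
--         0b000000001000: "April",
--         0b000000010000: "May",
--         0b000000100000: "June",
--         0b000001000000: "July",
--         0b000010000000: "August",
--         0b000100000000: "September",
--         0b001000000000: "October",
--         0b010000000000: "November",
--         0b100000000000: "December",
--     }
--     # Bitwise AND schedule with each month's bit mask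
--     # If the result is non-zero, the month is active
--     active_months = []
--     for n, month in months.items():
--         if schedule & n:
--             active_months.append(month)
--     return active_months
-- ===== SOURCE B (Python) =====
-- from typing import List
--
-- _MONTHS = (
--     "January", "February", "March", "April", "May", "June",
--     "July", "August", "September", "October", "November", "December",
-- )
--
-- def get_maintenance_active_months(schedule: int | None) -> List[str]:
--     if schedule is None:
--         return []
--     active_months = []
--     s = schedule & 0xFFF  # keep the 12 month bits; normalises negative schedules too
--     while s:
--         b = s & -s                 # lowest set bit
--         active_months.append(_MONTHS[b.bit_length() - 1])
--         s &= s - 1                 # clear it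
--     return active_months
-- ===== Notes on version B (the rewrite author's own statement) =====
-- stated objective: alternative
-- what changed: Replaces the dict of 12 bit-masks with an AND test per month by a low-bit iteration: mask schedule to 12 bits once, then repeatedly isolate the lowest set bit (s & -s), index a month-name tuple by its bit_length, and clear it with s &= s-1, so only active months are visited.
import Mathlib
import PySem

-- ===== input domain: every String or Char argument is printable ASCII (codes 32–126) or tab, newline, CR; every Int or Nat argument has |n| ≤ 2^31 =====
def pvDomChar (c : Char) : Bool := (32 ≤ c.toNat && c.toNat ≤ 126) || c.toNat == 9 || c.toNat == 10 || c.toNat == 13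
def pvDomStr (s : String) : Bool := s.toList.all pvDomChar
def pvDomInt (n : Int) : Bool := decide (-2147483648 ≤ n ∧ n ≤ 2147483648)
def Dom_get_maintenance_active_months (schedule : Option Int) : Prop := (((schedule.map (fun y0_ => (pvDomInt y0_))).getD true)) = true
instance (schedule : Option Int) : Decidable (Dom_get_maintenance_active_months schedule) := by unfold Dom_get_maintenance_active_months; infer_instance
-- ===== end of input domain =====

-- B iterates only over the set bits of the 12-bit-masked schedule instead of testing all 12 masks.

-- ===== PORT A =====
-- the `months` dict literal (distinct keys, insertion order) as an association list
def pvMonthsDict : List (Int × String) :=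
  [(1, "January"), (2, "February"), (4, "March"), (8, "April"),
   (16, "May"), (32, "June"), (64, "July"), (128, "August"),
   (256, "September"), (512, "October"), (1024, "November"), (2048, "December")]

def get_maintenance_active_months (schedule : Option Int) : List String :=
  match schedule with
  | none => []
  | some schedule =>
    pvMonthsDict.foldl
      (fun active_months p =>
        if PySem.Int.band schedule p.1 ≠ 0 then active_months ++ [p.2] else active_months)
      []

-- ===== PORT B =====
def pvMonthNames : List String :=
  ["January", "February", "March", "April", "May", "June",
   "July", "August", "September", "October", "November", "December"]

-- the `while s:` loop; fuel only makes the recursion structural (12 suffices: s has ≤ 12 bits)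
def pvAltLoop : Nat → Int → List String → List String
  | 0, _, active_months => active_months
  | fuel + 1, s, active_months =>
    if s ≠ 0 then
      let b := PySem.Int.band s (-s)
      pvAltLoop fuel (PySem.Int.band s (s - 1))
        (active_months ++ [pvMonthNames.getD (PySem.Int.bitLength b - 1) ""])
    else active_months

def get_maintenance_active_months_alt (schedule : Option Int) : List String :=
  match schedule with
  | none => []
  | some schedule => pvAltLoop 12 (PySem.Int.band schedule 4095) []

-- ===== PRECONDITION & SPEC =====
def Spec_get_maintenance_active_months (schedule : Option Int) (out : List String) : Prop := out = get_maintenance_active_months_alt schedule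
instance (schedule : Option Int) (out : List String) : Decidable (Spec_get_maintenance_active_months schedule out) := by unfold Spec_get_maintenance_active_months; infer_instance

-- ===== CLAIM (what is proved, stated in full; the proofs are below) =====
def Claim_equal_get_maintenance_active_months : Prop := ∀ (schedule : Option Int), Dom_get_maintenance_active_months schedule → Spec_get_maintenance_active_months schedule (get_maintenance_active_months schedule)

-- ===== LEMMAS AND PROOFS =====

-- the twelve month masks
def pvBits : List Nat := [1, 2, 4, 8, 16, 32, 64, 128, 256, 512, 1024, 2048]

-- A's fold body, as a function of the schedule value
def pvAfold (t : Int) : List String :=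
  pvMonthsDict.foldl
    (fun active_months p =>
      if PySem.Int.band t p.1 ≠ 0 then active_months ++ [p.2] else active_months)
    []

theorem pvLandMask (x c : Nat) (hc : c &&& 4095 = c) : x &&& c = (x &&& 4095) &&& c := by
  have hb : ∀ j, (c.testBit j && (4095 : Nat).testBit j) = c.testBit j := by
    intro j; rw [← Nat.testBit_land, hc]
  apply Nat.eq_of_testBit_eq
  intro j
  simp only [Nat.testBit_land]
  cases h1 : x.testBit j <;> cases h2 : c.testBit j <;> cases h3 : (4095 : Nat).testBit j <;>
    simp_all

theorem pvLandMask2 (a b : Nat) (ha : a &&& 4095 = a) : a &&& b = a &&& (b &&& 4095) := by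
  have hb : ∀ j, (a.testBit j && (4095 : Nat).testBit j) = a.testBit j := by
    intro j; rw [← Nat.testBit_land, ha]
  apply Nat.eq_of_testBit_eq
  intro j
  simp only [Nat.testBit_land]
  cases h1 : a.testBit j <;> cases h2 : b.testBit j <;> cases h3 : (4095 : Nat).testBit j <;>
    simp_all

theorem pvBandNegLeft (a : Int) (ha : a < 0) (c : Nat) :
    PySem.Int.band a ↑c = ↑(c - (c &&& (-a - 1).toNat)) := by
  rw [PySem.Int.band_comm]
  simp [PySem.Int.band, not_le.mpr ha]

-- bounded ∀ over 4096 split as 64×64 so that decide's recursion stays shallow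
theorem pvBall4096 (P : Nat → Prop) [DecidablePred P]
    (h : ∀ a : Nat, a < 64 → ∀ b : Nat, b < 64 → P (64 * a + b)) : ∀ m : Nat, m < 4096 → P m := by
  intro m hm
  have := h (m / 64) (by omega) (m % 64) (by omega)
  rwa [Nat.div_add_mod] at this

theorem pvSubMask : ∀ m' : Nat, m' < 4096 → ∀ c ∈ pvBits, c - (c &&& m') = (4095 - (4095 &&& m')) &&& c :=
  pvBall4096 _ (by decide)

theorem pvBandC (sch : Int) (c : Nat) (hc : c ∈ pvBits) :
    PySem.Int.band sch ↑c = PySem.Int.band (PySem.Int.band sch 4095) ↑c := by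
  have hc' : c &&& 4095 = c := by fin_cases hc <;> decide
  rcases (by omega : 0 ≤ sch ∨ sch < 0) with h | h
  · rw [PySem.Int.band_of_nonneg h (by positivity),
        PySem.Int.band_of_nonneg h (by norm_num),
        PySem.Int.band_of_nonneg (by positivity) (by positivity)]
    simp only [Int.toNat_natCast, show Int.toNat 4095 = 4095 from rfl]
    exact congrArg _ (pvLandMask sch.toNat c hc')
  · have h4095 : PySem.Int.band sch 4095 = ↑(4095 - (4095 &&& (-sch - 1).toNat)) := by
      exact_mod_cast pvBandNegLeft sch h 4095
    rw [pvBandNegLeft sch h c, h4095,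
        PySem.Int.band_of_nonneg (by positivity) (by positivity)]
    simp only [Int.toNat_natCast]
    set m := (-sch - 1).toNat with hm
    have e1 : c &&& m = c &&& (m &&& 4095) := pvLandMask2 c m hc'
    have e2 : (4095 : Nat) &&& m = 4095 &&& (m &&& 4095) := pvLandMask2 4095 m (by decide)
    rw [e1, e2]
    exact congrArg _ (pvSubMask (m &&& 4095) (by have := Nat.and_le_right (n := m) (m := 4095); omega) c hc)

theorem pvAfoldMask (sch : Int) : pvAfold sch = pvAfold (PySem.Int.band sch 4095) := by
  have e : ∀ c ∈ pvBits, PySem.Int.band sch ↑c = PySem.Int.band (PySem.Int.band sch 4095) ↑c :=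
    fun c hc => pvBandC sch c hc
  have e1 := e 1 (by decide); have e2 := e 2 (by decide); have e3 := e 4 (by decide)
  have e4 := e 8 (by decide); have e5 := e 16 (by decide); have e6 := e 32 (by decide)
  have e7 := e 64 (by decide); have e8 := e 128 (by decide); have e9 := e 256 (by decide)
  have e10 := e 512 (by decide); have e11 := e 1024 (by decide); have e12 := e 2048 (by decide)
  push_cast at e1 e2 e3 e4 e5 e6 e7 e8 e9 e10 e11 e12
  simp only [pvAfold, pvMonthsDict, List.foldl, e1, e2, e3, e4, e5, e6, e7, e8, e9, e10, e11, e12]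

theorem pvBandSmall (sch : Int) : ∃ m : Nat, m < 4096 ∧ PySem.Int.band sch 4095 = ↑m := by
  rcases (by omega : 0 ≤ sch ∨ sch < 0) with h | h
  · refine ⟨sch.toNat &&& 4095, ?_, ?_⟩
    · have := Nat.and_le_right (n := sch.toNat) (m := 4095); omega
    · rw [PySem.Int.band_of_nonneg h (by norm_num)]
      simp only [show Int.toNat 4095 = 4095 from rfl]
  · refine ⟨4095 - (4095 &&& (-sch - 1).toNat), by omega, ?_⟩
    exact_mod_cast pvBandNegLeft sch h 4095

set_option maxRecDepth 8192 in
set_option maxHeartbeats 4000000 in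
theorem pvSmallEq : ∀ m : Nat, m < 4096 → pvAfold ↑m = pvAltLoop 12 ↑m [] :=
  pvBall4096 _ (by decide)

-- ===== VERDICT (by name: the statement is the Claim_ definition above) =====
theorem get_maintenance_active_months_spec : Claim_equal_get_maintenance_active_months := by
  intro schedule _
  unfold Spec_get_maintenance_active_months
  cases schedule with
  | none => rfl
  | some sch =>
    show pvAfold sch = get_maintenance_active_months_alt (some sch)
    obtain ⟨m, hm, hb⟩ := pvBandSmall sch
    calc pvAfold sch = pvAfold (PySem.Int.band sch 4095) := pvAfoldMask sch
      _ = pvAfold ↑m := by rw [hb]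
      _ = pvAltLoop 12 ↑m [] := pvSmallEq m hm
      _ = get_maintenance_active_months_alt (some sch) := by
            show _ = pvAltLoop 12 (PySem.Int.band sch 4095) []
            rw [hb]
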